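-- pv_equiv track=rewrite | github.com/rob-3r7o/aoc2023 | day11/main.py | expand_space2
-- ===== SOURCE A (Python) =====
-- def transpose_matrix(matrix):
--     return [list(e) for e in (zip(*matrix))]
--
-- def expand_space2(matrix, ret=False):
--     rw_cl_to_expand = []
--     for i in range(len(matrix)):
--         row = matrix[i]
--         if len(list(filter(lambda x: x == ".", row))) == len(row):
--             rw_cl_to_expand.append(i)
--     if ret:
--         return rw_cl_to_expand
--
--     matrix = transpose_matrix(matrix)
--
--     return rw_cl_to_expand, expand_space2(matrix, True)
-- ===== SOURCE B (Python) =====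
-- def expand_space2(matrix, ret=False):
--     rows = [i for i, row in enumerate(matrix) if all(x == "." for x in row)]
--     if ret:
--         return rows
--     ncols = min((len(row) for row in matrix), default=0)
--     cols = [j for j in range(ncols) if all(row[j] == "." for row in matrix)]
--     return rows, cols
-- ===== Notes on version B (the rewrite author's own statement) =====
-- stated objective: alternative
-- what changed: B computes the empty columns by scanning columns of the original matrix directly (one all() test per column index up to the shortest row length) instead of A's building a transposed matrix with zip(*) and recursing into itself on it; rows are collected by a single enumerate/all comprehension instead of A's filter-and-count-per-row loop.
-- outside the precondition, e.g. on expand_space2([['.']], True): A returns (0,), B returns (0,)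
import Mathlib
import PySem

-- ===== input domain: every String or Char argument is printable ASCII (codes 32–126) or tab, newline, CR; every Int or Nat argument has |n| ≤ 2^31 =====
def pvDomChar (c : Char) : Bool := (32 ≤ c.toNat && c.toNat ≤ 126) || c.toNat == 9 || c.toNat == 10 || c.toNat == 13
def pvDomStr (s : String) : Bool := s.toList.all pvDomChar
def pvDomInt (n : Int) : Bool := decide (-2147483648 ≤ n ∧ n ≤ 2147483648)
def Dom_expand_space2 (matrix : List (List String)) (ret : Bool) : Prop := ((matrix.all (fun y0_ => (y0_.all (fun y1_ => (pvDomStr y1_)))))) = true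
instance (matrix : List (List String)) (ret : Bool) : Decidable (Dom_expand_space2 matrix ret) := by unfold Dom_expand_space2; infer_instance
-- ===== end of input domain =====

-- B replaces A's transpose-and-recurse column pass by a direct column scan (no transpose, no recursion); equivalence is about the return value.

-- ===== PORT A =====
-- zip(*matrix), step by step: emits the list of heads while no row is exhausted, then recurses
-- on the tails; fuel = length of the first row (exact: zip stops at the shortest row, which is
-- no longer than the first, and stops immediately when matrix is empty).
def pvZipStar : Nat → List (List String) → List (List String)
  | 0, _ => []
  | f + 1, m =>
    if m.isEmpty || m.any (fun r => r.isEmpty) then []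
    else (m.map (fun r => r.headD "")) :: pvZipStar f (m.map (fun r => r.tail))

def transpose_matrix (matrix : List (List String)) : List (List String) :=
  pvZipStar (matrix.headD []).length matrix

-- ret=True: Python returns only the row list; encoded here as (rows, []) — Pre_ excludes ret=true.
def expand_space2 (matrix : List (List String)) (ret : Bool) : List Int × List Int :=
  let rw_cl_to_expand :=
    (PySem.List.pyRange 0 (matrix.length : Int)).foldl
      (fun acc i =>
        let row := PySem.List.pyGetD matrix i []
        if (row.filter (fun x => x == ".")).length = row.length then acc ++ [i] else acc) []
  if ret then (rw_cl_to_expand, [])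
  else (rw_cl_to_expand, (expand_space2 (transpose_matrix matrix) true).1)
termination_by (if ret then 0 else 1)
decreasing_by simp_all

-- ===== PORT B =====
def expand_space2_alt (matrix : List (List String)) (ret : Bool) : List Int × List Int :=
  let rows : List Int :=
    (PySem.List.enumerate matrix).filterMap
      (fun p => if p.2.all (fun x => x == ".") then some p.1 else none)
  if ret then (rows, [])
  else
    let ncols : Nat := ((matrix.map List.length).min?).getD 0   -- min(lengths, default=0)
    let cols : List Int :=
      (List.range ncols).filterMap
        -- row[j]: j < ncols ≤ every row's length, so getD's default is never read (exact)
        (fun j => if matrix.all (fun row => row.getD j "" == ".") then some (j : Int) else none)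
    (rows, cols)

-- ===== PRECONDITION & SPEC =====
-- Pre_ excludes ret = true, where the Python function returns a bare list of row indices — not a
-- value of the declared pair type tuple[list[int], list[int]] — so no pair can be claimed there.
def Pre_expand_space2 (matrix : List (List String)) (ret : Bool) : Prop := ret = false
instance (matrix : List (List String)) (ret : Bool) : Decidable (Pre_expand_space2 matrix ret) := by unfold Pre_expand_space2; infer_instance
def pvWitness_expand_space2 : List (List String) × Bool := ([[".", "#"], [".", "."]], false)

def Spec_expand_space2 (matrix : List (List String)) (ret : Bool) (out : List Int × List Int) : Prop := out = expand_space2_alt matrix ret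
instance (matrix : List (List String)) (ret : Bool) (out : List Int × List Int) : Decidable (Spec_expand_space2 matrix ret out) := by unfold Spec_expand_space2; infer_instance

-- ===== CLAIM (what is proved, stated in full; the proofs are below) =====
def Claim_equal_expand_space2 : Prop := ∀ (matrix : List (List String)) (ret : Bool), Dom_expand_space2 matrix ret → Pre_expand_space2 matrix ret → Spec_expand_space2 matrix ret (expand_space2 matrix ret)

-- ===== LEMMAS AND PROOFS =====

-- all-dot test of A ('count of "." equals the length') agrees with B's all(…)
lemma pv_cond_decide (row : List String) :
    decide ((row.filter (fun x => x == ".")).length = row.length) = row.all (fun x => x == ".") := by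
  rw [Bool.eq_iff_iff]
  simp [List.countP_eq_length, List.all_eq_true]

lemma pv_filterMap_if {α β : Type} (p : α → Bool) (f : α → β) (l : List α) :
    l.filterMap (fun x => if p x then some (f x) else none) = (l.filter p).map f := by
  induction l with
  | nil => rfl
  | cons x xs ih => by_cases h : p x <;> simp [List.filterMap_cons, List.filter_cons, h, ih]

-- A's row scan, in closed form
lemma pv_scanA_eq (m : List (List String)) :
    (PySem.List.pyRange 0 (m.length : Int)).foldl
      (fun acc i =>
        if ((PySem.List.pyGetD m i []).filter (fun x => x == ".")).length
            = (PySem.List.pyGetD m i []).length then acc ++ [i] else acc) [] =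
    ((List.range m.length).filter (fun k => (m.getD k []).all (fun x => x == "."))).map
      (fun k : Nat => (k : Int)) := by
  rw [PySem.List.foldl_append_ite_eq_filter
    (p := fun i => ((PySem.List.pyGetD m i []).filter (fun x => x == ".")).length
      = (PySem.List.pyGetD m i []).length)]
  rw [PySem.List.pyRange_one]
  have hf : (fun k : Nat => (0 : Int) + (k : Int)) = (fun k : Nat => (k : Int)) := by
    funext k; simp
  simp only [List.nil_append, Int.sub_zero, Int.toNat_natCast, hf]
  rw [List.filter_map]
  congr 1
  apply List.filter_congr
  intro k _
  simp only [Function.comp_def, PySem.List.pyGetD_natCast]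
  exact pv_cond_decide _

-- B's row scan, in the same closed form
lemma pv_rowsB_eq (m : List (List String)) :
    (PySem.List.enumerate m).filterMap
      (fun p => if p.2.all (fun x => x == ".") then some p.1 else none) =
    ((List.range m.length).filter (fun k => (m.getD k []).all (fun x => x == "."))).map
      (fun k : Nat => (k : Int)) := by
  rw [PySem.List.enumerate_eq_map_pyRange m [], List.filterMap_map, PySem.List.pyRange_one]
  simp only [PySem.List.len]
  simp only [Int.sub_zero, Int.toNat_natCast, List.filterMap_map]
  have : ∀ k : Nat, (fun p : Int × List String =>
      if p.2.all (fun x => x == ".") then some p.1 else none)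
        ((fun j : Int => (j, PySem.List.pyGetD m j [])) ((0 : Int) + (k : Int))) =
      (fun k : Nat => if (m.getD k []).all (fun x => x == ".") then some ((k : Int)) else none) k := by
    intro k
    simp [PySem.List.pyGetD_natCast]
  rw [List.filterMap_congr (by intro k _; exact this k)]
  exact pv_filterMap_if _ _ _

lemma pv_min_le_of_mem {l : List Nat} {a : Nat} (h : a ∈ l) : l.min?.getD 0 ≤ a := by
  rcases e : l.min? with _ | b
  · simp [List.min?_eq_none_iff] at e; simp [e] at h
  · rcases (List.min?_eq_some_iff.mp e) with ⟨_, hle⟩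
    simpa using hle a h

lemma pv_min_zero {l : List Nat} (h : (0 : Nat) ∈ l) : l.min?.getD 0 = 0 :=
  Nat.le_zero.mp (pv_min_le_of_mem h)

lemma pv_min_tails {l : List Nat} (hne : l ≠ []) (h1 : ∀ x ∈ l, 1 ≤ x) :
    (l.map (fun x => x - 1)).min?.getD 0 = l.min?.getD 0 - 1 := by
  rcases e : l.min? with _ | b
  · exact absurd (List.min?_eq_none_iff.mp e) hne
  · rcases List.min?_eq_some_iff.mp e with ⟨hb, hle⟩
    have : (l.map (fun x => x - 1)).min? = some (b - 1) := by
      rw [List.min?_eq_some_iff]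
      constructor
      · exact List.mem_map.mpr ⟨b, hb, rfl⟩
      · intro c hc
        rcases List.mem_map.mp hc with ⟨x, hx, rfl⟩
        exact Nat.sub_le_sub_right (hle x hx) 1
    simp [this, e]

lemma pv_tail_getD (r : List String) (j : Nat) : r.tail.getD j "" = r.getD (j + 1) "" := by
  cases r <;> rfl

lemma pv_zip_char : ∀ (f : Nat) (m : List (List String)), m ≠ [] →
    (m.map List.length).min?.getD 0 ≤ f →
    pvZipStar f m =
      (List.range ((m.map List.length).min?.getD 0)).map
        (fun j => m.map (fun r => r.getD j "")) := by
  intro f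
  induction f with
  | zero =>
    intro m _ hle
    have h0 : (m.map List.length).min?.getD 0 = 0 := Nat.le_zero.mp hle
    simp [pvZipStar, h0]
  | succ f ih =>
    intro m hne hle
    have hem : m.isEmpty = false := by simpa [List.isEmpty_iff] using hne
    by_cases hA : m.any (fun r => r.isEmpty)
    · rcases List.any_eq_true.mp hA with ⟨r, hr, hre⟩
      have h0 : (m.map List.length).min?.getD 0 = 0 :=
        pv_min_zero (List.mem_map.mpr ⟨r, hr, by simpa [List.isEmpty_iff] using hre⟩)
      simp [pvZipStar, hem, hA, h0]
    · have h1 : ∀ x ∈ m.map List.length, 1 ≤ x := by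
        intro x hx
        rcases List.mem_map.mp hx with ⟨r, hr, rfl⟩
        have : r.isEmpty = false := by
          by_contra hc
          exact hA (List.any_eq_true.mpr ⟨r, hr, by simpa using hc⟩)
        have : r ≠ [] := by simpa [List.isEmpty_iff] using this
        exact Nat.one_le_iff_ne_zero.mpr (by simpa using this)
      have hmapne : m.map List.length ≠ [] := by simpa using hne
      have hμ1 : 1 ≤ (m.map List.length).min?.getD 0 := by
        rcases e : (m.map List.length).min? with _ | b
        · exact absurd (List.min?_eq_none_iff.mp e) hmapne
        · simpa [e] using h1 b (List.min?_mem e)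
      have hlen : (m.map (fun r => r.tail)).map List.length
          = (m.map List.length).map (fun x => x - 1) := by
        simp [List.map_map, Function.comp_def]
      have htails : ((m.map (fun r => r.tail)).map List.length).min?.getD 0
          = (m.map List.length).min?.getD 0 - 1 := by
        rw [hlen]; exact pv_min_tails hmapne h1
      have htne : m.map (fun r => r.tail) ≠ [] := by simpa using hne
      have ihres := ih (m.map (fun r => r.tail)) htne
        (by rw [htails]; omega)
      have hsucc : (m.map List.length).min?.getD 0
          = ((m.map List.length).min?.getD 0 - 1) + 1 := by omega
      have hA' : (m.any fun r => r.isEmpty) = false := by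
        cases h : m.any fun r => r.isEmpty
        · rfl
        · exact absurd h hA
      rw [pvZipStar, hem, hA']
      simp only [Bool.or_self, Bool.false_eq_true, if_false]
      rw [ihres, htails]
      conv_rhs => rw [hsucc, List.range_succ_eq_map]
      simp only [List.map_cons, List.map_map]
      congr 1
      · apply List.map_congr_left
        intro r _
        cases r <;> rfl
      · apply List.map_congr_left
        intro j _
        simp only [Function.comp_def, List.map_map]
        apply List.map_congr_left
        intro r _
        simpa [Nat.succ_eq_add_one] using pv_tail_getD r j

lemma pv_transpose_char (m : List (List String)) :
    transpose_matrix m =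
      (List.range ((m.map List.length).min?.getD 0)).map
        (fun j => m.map (fun r => r.getD j "")) := by
  cases m with
  | nil => rfl
  | cons r rs =>
    have : transpose_matrix (r :: rs) = pvZipStar r.length (r :: rs) := rfl
    rw [this]
    exact pv_zip_char r.length (r :: rs) (by simp)
      (pv_min_le_of_mem (l := ((r :: rs).map List.length)) (by simp))

-- ===== VERDICT (by name: the statement is the Claim_ definition above) =====
theorem expand_space2_spec : Claim_equal_expand_space2 := by
  intro matrix ret _ hpre
  unfold Pre_expand_space2 at hpre
  subst hpre
  unfold Spec_expand_space2
  rw [expand_space2, expand_space2, expand_space2_alt]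
  simp only [Bool.false_eq_true, if_false, if_true]
  congr 1
  · exact (pv_scanA_eq matrix).trans (pv_rowsB_eq matrix).symm
  · rw [pv_scanA_eq, pv_filterMap_if, pv_transpose_char]
    simp only [List.length_map, List.length_range]
    congr 1
    apply List.filter_congr
    intro k hk
    have hk' : k < ((matrix.map List.length).min?.getD 0) := List.mem_range.mp hk
    simp [List.getD_eq_getElem?_getD, List.getElem?_map, List.getElem?_range, hk',
      List.all_map, Function.comp_def]
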